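-- pv_equiv track=rewrite | github.com/Dofolk/Leetcode_py | 697.py | findShortestSubArray
-- ===== SOURCE A (Python) =====
-- from typing import List
--
-- def findShortestSubArray(nums: List[int]) -> int:
--     left, right, count = {}, {}, {}
--     for i,v in enumerate(nums):
--         if v not in left: left[v] = i
--         right[v] = i
--         count[v] = count.get(v,0) + 1
--     degree = max(count.values())
--     ans = len(nums)
--     for i in count:
--         if count[i]==degree:
--             ans = min(ans, right[i]-left[i]+1)
--     return ans
-- ===== SOURCE B (Python) =====
-- from typing import List
--
-- def findShortestSubArray(nums: List[int]) -> int: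
--     first, count = {}, {}
--     degree, ans = 0, 0
--     for i, v in enumerate(nums):
--         if v not in first:
--             first[v] = i
--         c = count.get(v, 0) + 1
--         count[v] = c
--         span = i - first[v] + 1
--         if c > degree:
--             degree, ans = c, span
--         elif c == degree:
--             ans = min(ans, span)
--     return ans
-- ===== Notes on version B (the rewrite author's own statement) =====
-- stated objective: simpler
-- what changed: B computes the degree and the shortest span in the same single enumerate pass (dicts for first index and count plus scalar degree/ans), eliminating A's right-index dict, the separate max() over counts and the final scan over all distinct values.
import Mathlib
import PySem

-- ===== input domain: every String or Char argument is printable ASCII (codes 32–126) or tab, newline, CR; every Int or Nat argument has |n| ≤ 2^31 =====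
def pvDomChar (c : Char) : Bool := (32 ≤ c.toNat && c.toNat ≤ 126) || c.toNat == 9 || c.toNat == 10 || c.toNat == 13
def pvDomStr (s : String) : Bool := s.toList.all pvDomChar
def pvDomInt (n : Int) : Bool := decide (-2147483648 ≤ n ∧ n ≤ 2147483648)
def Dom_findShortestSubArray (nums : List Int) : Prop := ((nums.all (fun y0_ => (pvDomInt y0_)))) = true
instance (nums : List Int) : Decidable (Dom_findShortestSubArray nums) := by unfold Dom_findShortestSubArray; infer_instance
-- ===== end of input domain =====

-- B replaces A's three-dict build plus separate max pass and final key scan by one pass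
-- maintaining first-index/count dicts and running degree/ans scalars (objective: simpler, one traversal).

-- ===== PORT A =====
def findShortestSubArray (nums : List Int) : Int :=
  let st := (PySem.List.enumerate nums 0).foldl
    (fun (st : PySem.Dict Int Int × PySem.Dict Int Int × PySem.Dict Int Int) p =>
      let left := if st.1.contains p.2 then st.1 else st.1.insert p.2 p.1
      let right := st.2.1.insert p.2 p.1
      let count := st.2.2.insert p.2 (st.2.2.getD p.2 0 + 1)
      (left, right, count))
    (PySem.Dict.empty, PySem.Dict.empty, PySem.Dict.empty)
  -- max(count.values()): Pre_ excludes the empty list, where Python raises ValueError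
  let degree := (PySem.List.max? st.2.2.values (fun y => y)).getD 0
  st.2.2.keys.foldl
    (fun ans k =>
      if st.2.2.getD k 0 = degree then min ans (st.2.1.getD k 0 - st.1.getD k 0 + 1) else ans)
    (nums.length : Int)

-- ===== PORT B =====
def findShortestSubArray_alt (nums : List Int) : Int :=
  ((PySem.List.enumerate nums 0).foldl
    (fun (st : PySem.Dict Int Int × PySem.Dict Int Int × Int × Int) p =>
      let first := if st.1.contains p.2 then st.1 else st.1.insert p.2 p.1
      let c := st.2.1.getD p.2 0 + 1
      let count := st.2.1.insert p.2 c
      let span := p.1 - first.getD p.2 0 + 1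
      if c > st.2.2.1 then (first, count, c, span)
      else if c = st.2.2.1 then (first, count, st.2.2.1, min st.2.2.2 span)
      else (first, count, st.2.2.1, st.2.2.2))
    (PySem.Dict.empty, PySem.Dict.empty, 0, 0)).2.2.2

-- ===== PRECONDITION & SPEC =====
-- Pre_ excludes only the empty list, on which A raises ValueError (max() of an empty sequence).
def Pre_findShortestSubArray (nums : List Int) : Prop := nums ≠ []
instance (nums : List Int) : Decidable (Pre_findShortestSubArray nums) := by unfold Pre_findShortestSubArray; infer_instance
def pvWitness_findShortestSubArray : List Int := [1, 2, 2, 3, 1]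

def Spec_findShortestSubArray (nums : List Int) (out : Int) : Prop := out = findShortestSubArray_alt nums
instance (nums : List Int) (out : Int) : Decidable (Spec_findShortestSubArray nums out) := by unfold Spec_findShortestSubArray; infer_instance

-- ===== CLAIM (what is proved, stated in full; the proofs are below) =====
def Claim_equal_findShortestSubArray : Prop := ∀ (nums : List Int), Dom_findShortestSubArray nums → Pre_findShortestSubArray nums → Spec_findShortestSubArray nums (findShortestSubArray nums)

-- ===== LEMMAS AND PROOFS =====

-- proof-side names for the two folds and the loop invariant
def pvStepA (st : PySem.Dict Int Int × PySem.Dict Int Int × PySem.Dict Int Int) (p : Int × Int) :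
    PySem.Dict Int Int × PySem.Dict Int Int × PySem.Dict Int Int :=
  let left := if st.1.contains p.2 then st.1 else st.1.insert p.2 p.1
  let right := st.2.1.insert p.2 p.1
  let count := st.2.2.insert p.2 (st.2.2.getD p.2 0 + 1)
  (left, right, count)
def pvA (xs : List Int) : PySem.Dict Int Int × PySem.Dict Int Int × PySem.Dict Int Int :=
  (PySem.List.enumerate xs 0).foldl pvStepA (PySem.Dict.empty, PySem.Dict.empty, PySem.Dict.empty)
def pvStepB (st : PySem.Dict Int Int × PySem.Dict Int Int × Int × Int) (p : Int × Int) :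
    PySem.Dict Int Int × PySem.Dict Int Int × Int × Int :=
  let first := if st.1.contains p.2 then st.1 else st.1.insert p.2 p.1
  let c := st.2.1.getD p.2 0 + 1
  let count := st.2.1.insert p.2 c
  let span := p.1 - first.getD p.2 0 + 1
  if c > st.2.2.1 then (first, count, c, span)
  else if c = st.2.2.1 then (first, count, st.2.2.1, min st.2.2.2 span)
  else (first, count, st.2.2.1, st.2.2.2)
def pvB (xs : List Int) : PySem.Dict Int Int × PySem.Dict Int Int × Int × Int :=
  (PySem.List.enumerate xs 0).foldl pvStepB (PySem.Dict.empty, PySem.Dict.empty, 0, 0)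
lemma pvA_eq (nums : List Int) :
    findShortestSubArray nums =
      (let st := pvA nums
       let degree := (PySem.List.max? st.2.2.values (fun y => y)).getD 0
       st.2.2.keys.foldl
         (fun ans k =>
           if st.2.2.getD k 0 = degree then min ans (st.2.1.getD k 0 - st.1.getD k 0 + 1) else ans)
         (nums.length : Int)) := rfl

lemma pvB_eq (nums : List Int) : findShortestSubArray_alt nums = (pvB nums).2.2.2 := rfl

lemma pvEnum_append (xs : List Int) (x : Int) (s : Int) :
    PySem.List.enumerate (xs ++ [x]) s = PySem.List.enumerate xs s ++ [(s + xs.length, x)] := by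
  induction xs generalizing s with
  | nil => simp [PySem.List.enumerate_cons, PySem.List.enumerate_nil]
  | cons y ys ih =>
      simp [PySem.List.enumerate_cons, ih (s + 1)]
      ring_nf
lemma pvA_append (xs : List Int) (x : Int) :
    pvA (xs ++ [x]) = pvStepA (pvA xs) ((xs.length : Int), x) := by
  simp [pvA, pvEnum_append, List.foldl_append]
lemma pvB_append (xs : List Int) (x : Int) :
    pvB (xs ++ [x]) = pvStepB (pvB xs) ((xs.length : Int), x) := by
  simp [pvB, pvEnum_append, List.foldl_append]
def pvInv (xs : List Int) : Prop :=
  (pvB xs).1 = (pvA xs).1 ∧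
  (pvB xs).2.1 = (pvA xs).2.2 ∧
  (∀ v : Int, (pvA xs).2.2.getD v 0 = (xs.count v : Int)) ∧
  (∀ v : Int, (pvA xs).1.contains v = decide (v ∈ xs)) ∧
  ((pvA xs).2.2.keys = PySem.Set.ofList xs) ∧
  (∀ v ∈ xs, 0 ≤ (pvA xs).1.getD v 0 ∧ (pvA xs).1.getD v 0 ≤ (pvA xs).2.1.getD v 0 ∧
      (pvA xs).2.1.getD v 0 < (xs.length : Int)) ∧
  (∀ v ∈ xs, (xs.count v : Int) ≤ (pvB xs).2.2.1) ∧
  (xs = [] → (pvB xs).2.2.1 = 0 ∧ (pvB xs).2.2.2 = 0) ∧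
  (xs ≠ [] → ∃ v ∈ xs, (xs.count v : Int) = (pvB xs).2.2.1 ∧
      (pvB xs).2.2.2 = (pvA xs).2.1.getD v 0 - (pvA xs).1.getD v 0 + 1) ∧
  (∀ v ∈ xs, (xs.count v : Int) = (pvB xs).2.2.1 →
      (pvB xs).2.2.2 ≤ (pvA xs).2.1.getD v 0 - (pvA xs).1.getD v 0 + 1)

lemma pvInv_holds (xs : List Int) : pvInv xs := by
  induction xs using List.reverseRecOn with
  | nil =>
      refine ⟨rfl, rfl, ?_, ?_, ?_, ?_, ?_, ?_, ?_, ?_⟩ <;>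
        simp [pvA, pvB, PySem.List.enumerate_nil]
  | append_singleton ys y ih =>
      obtain ⟨hF, hC, hcnt, hcont, hkeys, hkeep, hmax, hemp, hwit, hub⟩ := ih
      have hccont : (pvA ys).2.2.contains y = decide (y ∈ ys) := by
        simp [PySem.Dict.contains_eq_decide_mem_keys, hkeys, PySem.Set.mem_ofList]
      have hcnt' : ∀ v : Int, ((ys ++ [y]).count v : Int) =
          (ys.count v : Int) + (if v = y then 1 else 0) := by
        intro v
        by_cases h : v = y
        · simp [List.count_append, h]
        · simp [List.count_append, h, Ne.symm h]
      unfold pvInv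
      rw [pvA_append, pvB_append]
      simp only [pvStepA, pvStepB, hF, hC, hcont y]
      by_cases hyin : y ∈ ys
      · simp only [hyin, decide_true, if_true]
        have hcy0 : (0:Int) ≤ (pvA ys).2.2.getD y 0 := by rw [hcnt]; exact Int.natCast_nonneg _
        have hctrue : (pvA ys).2.2.contains y = true := by simp [hccont, hyin]
        have H3 : ∀ v : Int, ((pvA ys).2.2.insert y ((pvA ys).2.2.getD y 0 + 1)).getD v 0
            = ((ys ++ [y]).count v : Int) := by
          intro v
          rw [PySem.Dict.getD_insert, hcnt' v]
          by_cases hv : v = y <;> simp [hv, hcnt]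
        have H4 : ∀ v : Int, (pvA ys).1.contains v = decide (v ∈ ys ++ [y]) := by
          intro v
          rw [hcont v]
          by_cases hv : v = y
          · subst hv; simp [hyin]
          · simp [List.mem_append, hv]
        have H5 : ((pvA ys).2.2.insert y ((pvA ys).2.2.getD y 0 + 1)).keys
            = PySem.Set.ofList (ys ++ [y]) := by
          rw [PySem.Dict.keys_insert_of_contains _ _ hctrue, hkeys,
            PySem.Set.ofList_append_singleton,
            PySem.Set.add_of_mem ((PySem.Set.mem_ofList ys y).mpr hyin)]
        have H6 : ∀ v ∈ ys ++ [y],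
            0 ≤ (pvA ys).1.getD v 0 ∧
              (pvA ys).1.getD v 0 ≤ ((pvA ys).2.1.insert y (ys.length : Int)).getD v 0 ∧
                ((pvA ys).2.1.insert y (ys.length : Int)).getD v 0 < ((ys ++ [y]).length : Int) := by
          intro v hv
          have hv' : v ∈ ys := by
            rcases List.mem_append.1 hv with h | h
            · exact h
            · simp at h; subst h; exact hyin
          obtain ⟨b1, b2, b3⟩ := hkeep v hv'
          rw [PySem.Dict.getD_insert]
          by_cases hvy : v = y
          · subst hvy
            simp only [List.length_append, List.length_cons, List.length_nil]
            push_cast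
            omega
          · rw [if_neg hvy]
            simp only [List.length_append, List.length_cons, List.length_nil]
            push_cast
            omega
        refine ⟨by split_ifs <;> rfl, by split_ifs <;> rfl, H3, H4, H5, H6, ?_⟩
        by_cases hgt : (pvA ys).2.2.getD y 0 + 1 > (pvB ys).2.2.1
        · rw [if_pos hgt]
          dsimp only
          refine ⟨?_, by simp, ?_, ?_⟩
          · -- max bound
            intro v hv
            rw [hcnt' v]
            by_cases hvy : v = y
            · rw [hvy, hcnt y]; simp
            · have hv' : v ∈ ys := by
                rcases List.mem_append.1 hv with h | h
                · exact h
                · simp at h; exact absurd h hvy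
              have := hmax v hv'
              rw [hcnt y] at hgt ⊢
              simp only [if_neg hvy]
              omega
          · -- witness
            intro _
            refine ⟨y, by simp, ?_, ?_⟩
            · rw [hcnt' y, hcnt y]; simp
            · rw [PySem.Dict.getD_insert_self]
          · -- upper bounds
            intro v hv hc
            by_cases hvy : v = y
            · rw [hvy, PySem.Dict.getD_insert_self]
            · have hv' : v ∈ ys := by
                rcases List.mem_append.1 hv with h | h
                · exact h
                · simp at h; exact absurd h hvy
              have h1 := hmax v hv'
              rw [hcnt' v, if_neg hvy] at hc
              rw [hcnt y] at hgt hc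
              omega
        · rw [if_neg hgt]
          have hne : ys ≠ [] := by intro h; exact absurd hyin (by simp [h])
          obtain ⟨v0, hv0, hcv0, hansv0⟩ := hwit hne
          by_cases heq : (pvA ys).2.2.getD y 0 + 1 = (pvB ys).2.2.1
          · rw [if_pos heq]
            dsimp only
            have hv0y : v0 ≠ y := by
              intro h
              rw [h] at hcv0
              rw [hcnt y] at heq
              omega
            refine ⟨?_, by simp, ?_, ?_⟩
            · intro v hv
              rw [hcnt' v]
              by_cases hvy : v = y
              · rw [hvy]; rw [hcnt y] at heq; simp; omega
              · have hv' : v ∈ ys := by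
                  rcases List.mem_append.1 hv with h | h
                  · exact h
                  · simp at h; exact absurd h hvy
                have := hmax v hv'
                simp only [if_neg hvy]
                omega
            · intro _
              by_cases hms : (pvB ys).2.2.2 ≤ (ys.length : Int) - (pvA ys).1.getD y 0 + 1
              · refine ⟨v0, List.mem_append_left _ hv0, ?_, ?_⟩
                · rw [hcnt' v0, if_neg hv0y]; omega
                · rw [min_eq_left hms, PySem.Dict.getD_insert_of_ne _ _ _ hv0y, hansv0]
              · refine ⟨y, by simp, ?_, ?_⟩
                · rw [hcnt' y]; simp; rw [hcnt y] at heq; omega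
                · rw [min_eq_right (not_le.mp hms).le, PySem.Dict.getD_insert_self]
            · intro v hv hc
              by_cases hvy : v = y
              · rw [hvy, PySem.Dict.getD_insert_self]
                exact min_le_right _ _
              · have hv' : v ∈ ys := by
                  rcases List.mem_append.1 hv with h | h
                  · exact h
                  · simp at h; exact absurd h hvy
                rw [hcnt' v, if_neg hvy] at hc
                have h2 := hub v hv' (by omega)
                rw [PySem.Dict.getD_insert_of_ne _ _ _ hvy]
                exact le_trans (min_le_left _ _) h2
          · rw [if_neg heq]
            dsimp only
            have hv0y : v0 ≠ y := by
              intro h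
              rw [h] at hcv0
              rw [hcnt y] at hgt
              omega
            refine ⟨?_, by simp, ?_, ?_⟩
            · intro v hv
              rw [hcnt' v]
              by_cases hvy : v = y
              · rw [hvy]; rw [hcnt y] at hgt; simp; omega
              · have hv' : v ∈ ys := by
                  rcases List.mem_append.1 hv with h | h
                  · exact h
                  · simp at h; exact absurd h hvy
                have := hmax v hv'
                simp only [if_neg hvy]
                omega
            · intro _
              refine ⟨v0, List.mem_append_left _ hv0, ?_, ?_⟩
              · rw [hcnt' v0, if_neg hv0y]; omega
              · rw [PySem.Dict.getD_insert_of_ne _ _ _ hv0y, hansv0]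
            · intro v hv hc
              by_cases hvy : v = y
              · rw [hvy] at hc
                rw [hcnt' y] at hc
                simp at hc
                rw [hcnt y] at heq hgt
                omega
              · have hv' : v ∈ ys := by
                  rcases List.mem_append.1 hv with h | h
                  · exact h
                  · simp at h; exact absurd h hvy
                rw [hcnt' v, if_neg hvy] at hc
                have h2 := hub v hv' (by omega)
                rw [PySem.Dict.getD_insert_of_ne _ _ _ hvy]
                exact h2
      · have hd : decide (y ∈ ys) = false := by simp [hyin]
        rw [hd]
        simp only [Bool.false_eq_true, if_false]
        have hcy0 : (0:Int) ≤ (pvA ys).2.2.getD y 0 := by rw [hcnt]; exact Int.natCast_nonneg _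
        have hcfalse : (pvA ys).2.2.contains y = false := by simp [hccont, hyin]
        have H3 : ∀ v : Int, ((pvA ys).2.2.insert y ((pvA ys).2.2.getD y 0 + 1)).getD v 0
            = ((ys ++ [y]).count v : Int) := by
          intro v
          rw [PySem.Dict.getD_insert, hcnt' v]
          by_cases hv : v = y <;> simp [hv, hcnt]
        have H4 : ∀ v : Int, ((pvA ys).1.insert y (ys.length : Int)).contains v
            = decide (v ∈ ys ++ [y]) := by
          intro v
          rw [PySem.Dict.contains_insert, hcont v]
          by_cases hv : v = y
          · simp [hv]
          · simp [List.mem_append, hv]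
        have H5 : ((pvA ys).2.2.insert y ((pvA ys).2.2.getD y 0 + 1)).keys
            = PySem.Set.ofList (ys ++ [y]) := by
          rw [PySem.Dict.keys_insert_of_not_contains _ _ hcfalse, hkeys,
            PySem.Set.ofList_append_singleton,
            PySem.Set.add_of_not_mem (fun h => hyin ((PySem.Set.mem_ofList ys y).mp h))]
        have H6 : ∀ v ∈ ys ++ [y],
            0 ≤ ((pvA ys).1.insert y (ys.length : Int)).getD v 0 ∧
              ((pvA ys).1.insert y (ys.length : Int)).getD v 0 ≤
                  ((pvA ys).2.1.insert y (ys.length : Int)).getD v 0 ∧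
                ((pvA ys).2.1.insert y (ys.length : Int)).getD v 0 < ((ys ++ [y]).length : Int) := by
          intro v hv
          by_cases hvy : v = y
          · rw [hvy, PySem.Dict.getD_insert_self, PySem.Dict.getD_insert_self]
            simp only [List.length_append, List.length_cons, List.length_nil]
            push_cast
            omega
          · have hv' : v ∈ ys := by
              rcases List.mem_append.1 hv with h | h
              · exact h
              · simp at h; exact absurd h hvy
            obtain ⟨b1, b2, b3⟩ := hkeep v hv'
            rw [PySem.Dict.getD_insert_of_ne _ _ _ hvy, PySem.Dict.getD_insert_of_ne _ _ _ hvy]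
            simp only [List.length_append, List.length_cons, List.length_nil]
            push_cast
            omega
        refine ⟨by split_ifs <;> rfl, by split_ifs <;> rfl, H3, H4, H5, H6, ?_⟩
        by_cases hgt : (pvA ys).2.2.getD y 0 + 1 > (pvB ys).2.2.1
        · rw [if_pos hgt]
          dsimp only
          refine ⟨?_, by simp, ?_, ?_⟩
          · intro v hv
            rw [hcnt' v]
            by_cases hvy : v = y
            · rw [hvy, hcnt y]; simp
            · have hv' : v ∈ ys := by
                rcases List.mem_append.1 hv with h | h
                · exact h
                · simp at h; exact absurd h hvy
              have := hmax v hv'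
              rw [hcnt y] at hgt ⊢
              simp only [if_neg hvy]
              omega
          · intro _
            refine ⟨y, by simp, ?_, ?_⟩
            · rw [hcnt' y, hcnt y]; simp
            · rw [PySem.Dict.getD_insert_self, PySem.Dict.getD_insert_self]
          · intro v hv hc
            by_cases hvy : v = y
            · rw [hvy, PySem.Dict.getD_insert_self, PySem.Dict.getD_insert_self]
            · have hv' : v ∈ ys := by
                rcases List.mem_append.1 hv with h | h
                · exact h
                · simp at h; exact absurd h hvy
              have h1 := hmax v hv'
              rw [hcnt' v, if_neg hvy] at hc
              rw [hcnt y] at hgt hc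
              omega
        · rw [if_neg hgt]
          have hne : ys ≠ [] := by
            intro h
            have h1 := (hemp h).1
            rw [hcnt y, h1] at hgt
            simp [h] at hgt
          obtain ⟨v0, hv0, hcv0, hansv0⟩ := hwit hne
          have hv0y : v0 ≠ y := fun h => hyin (h ▸ hv0)
          by_cases heq : (pvA ys).2.2.getD y 0 + 1 = (pvB ys).2.2.1
          · rw [if_pos heq]
            dsimp only
            refine ⟨?_, by simp, ?_, ?_⟩
            · intro v hv
              rw [hcnt' v]
              by_cases hvy : v = y
              · rw [hvy]; rw [hcnt y] at heq; simp; omega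
              · have hv' : v ∈ ys := by
                  rcases List.mem_append.1 hv with h | h
                  · exact h
                  · simp at h; exact absurd h hvy
                have := hmax v hv'
                simp only [if_neg hvy]
                omega
            · intro _
              by_cases hms : (pvB ys).2.2.2 ≤
                  (ys.length : Int) - ((pvA ys).1.insert y (ys.length : Int)).getD y 0 + 1
              · refine ⟨v0, List.mem_append_left _ hv0, ?_, ?_⟩
                · rw [hcnt' v0, if_neg hv0y]; omega
                · rw [min_eq_left hms, PySem.Dict.getD_insert_of_ne _ _ _ hv0y,
                    PySem.Dict.getD_insert_of_ne _ _ _ hv0y, hansv0]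
              · refine ⟨y, by simp, ?_, ?_⟩
                · rw [hcnt' y]; simp; rw [hcnt y] at heq; omega
                · rw [min_eq_right (not_le.mp hms).le, PySem.Dict.getD_insert_self,
                    PySem.Dict.getD_insert_self]
            · intro v hv hc
              by_cases hvy : v = y
              · rw [hvy, PySem.Dict.getD_insert_self, PySem.Dict.getD_insert_self]
                exact min_le_right _ _
              · have hv' : v ∈ ys := by
                  rcases List.mem_append.1 hv with h | h
                  · exact h
                  · simp at h; exact absurd h hvy
                rw [hcnt' v, if_neg hvy] at hc
                have h2 := hub v hv' (by omega)
                rw [PySem.Dict.getD_insert_of_ne _ _ _ hvy, PySem.Dict.getD_insert_of_ne _ _ _ hvy]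
                exact le_trans (min_le_left _ _) h2
          · rw [if_neg heq]
            dsimp only
            refine ⟨?_, by simp, ?_, ?_⟩
            · intro v hv
              rw [hcnt' v]
              by_cases hvy : v = y
              · rw [hvy]; rw [hcnt y] at hgt; simp; omega
              · have hv' : v ∈ ys := by
                  rcases List.mem_append.1 hv with h | h
                  · exact h
                  · simp at h; exact absurd h hvy
                have := hmax v hv'
                simp only [if_neg hvy]
                omega
            · intro _
              refine ⟨v0, List.mem_append_left _ hv0, ?_, ?_⟩
              · rw [hcnt' v0, if_neg hv0y]; omega
              · rw [PySem.Dict.getD_insert_of_ne _ _ _ hv0y,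
                  PySem.Dict.getD_insert_of_ne _ _ _ hv0y, hansv0]
            · intro v hv hc
              by_cases hvy : v = y
              · rw [hvy] at hc
                rw [hcnt' y] at hc
                simp at hc
                rw [hcnt y] at heq hgt
                omega
              · have hv' : v ∈ ys := by
                  rcases List.mem_append.1 hv with h | h
                  · exact h
                  · simp at h; exact absurd h hvy
                rw [hcnt' v, if_neg hvy] at hc
                have h2 := hub v hv' (by omega)
                rw [PySem.Dict.getD_insert_of_ne _ _ _ hvy, PySem.Dict.getD_insert_of_ne _ _ _ hvy]
                exact h2

lemma pvFoldMin_const (cond : Int → Prop) [DecidablePred cond] (g : Int → Int) (m : Int)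
    (keys : List Int) (hge : ∀ k ∈ keys, cond k → m ≤ g k) :
    keys.foldl (fun a k => if cond k then min a (g k) else a) m = m := by
  induction keys with
  | nil => rfl
  | cons k0 t ih =>
      simp only [List.foldl_cons]
      by_cases h : cond k0
      · rw [if_pos h, min_eq_left (hge k0 (by simp) h)]
        exact ih (fun k hk => hge k (by simp [hk]))
      · rw [if_neg h]
        exact ih (fun k hk => hge k (by simp [hk]))

lemma pvFoldMin (cond : Int → Prop) [DecidablePred cond] (g : Int → Int) (m : Int)
    (keys : List Int) :
    ∀ init : Int, m ≤ init → (∃ k ∈ keys, cond k ∧ g k = m) → (∀ k ∈ keys, cond k → m ≤ g k) →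
    keys.foldl (fun a k => if cond k then min a (g k) else a) init = m := by
  induction keys with
  | nil => intro init _ hex _; simp at hex
  | cons k0 t ih =>
      intro init hinit hex hge
      simp only [List.foldl_cons]
      by_cases h : cond k0
      · rw [if_pos h]
        rcases hex with ⟨k, hk, hck, hgk⟩
        rcases List.mem_cons.1 hk with rfl | hkt
        · rw [hgk, min_eq_right hinit]
          exact pvFoldMin_const cond g m t (fun k hk hck => hge k (by simp [hk]) hck)
        · exact ih (min init (g k0)) (le_min hinit (hge k0 (by simp) h)) ⟨k, hkt, hck, hgk⟩
            (fun k hk => hge k (by simp [hk]))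
      · rw [if_neg h]
        rcases hex with ⟨k, hk, hck, hgk⟩
        rcases List.mem_cons.1 hk with rfl | hkt
        · exact absurd hck h
        · exact ih init hinit ⟨k, hkt, hck, hgk⟩ (fun k hk => hge k (by simp [hk]))

lemma pvMain (nums : List Int) (hpre : nums ≠ []) :
    (let st := pvA nums
     let degree := (PySem.List.max? st.2.2.values (fun y => y)).getD 0
     st.2.2.keys.foldl
       (fun ans k =>
         if st.2.2.getD k 0 = degree then min ans (st.2.1.getD k 0 - st.1.getD k 0 + 1) else ans)
       (nums.length : Int)) = (pvB nums).2.2.2 := by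
  obtain ⟨hF, hC, hcnt, hcont, hkeys, hkeep, hmax, hemp, hwit, hub⟩ := pvInv_holds nums
  obtain ⟨v0, hv0, hcv0, hansv0⟩ := hwit hpre
  have hnd : (pvA nums).2.2.keys.Nodup := by rw [hkeys]; exact PySem.Set.nodup_ofList _
  have hvals : (pvA nums).2.2.values
      = (pvA nums).2.2.keys.map (fun k => (pvA nums).2.2.getD k 0) :=
    PySem.Dict.values_eq_map_keys _ hnd 0
  have hv0k : v0 ∈ (pvA nums).2.2.keys := by
    rw [hkeys]; exact (PySem.Set.mem_ofList _ _).mpr hv0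
  have hdmem : (pvB nums).2.2.1 ∈ (pvA nums).2.2.values := by
    rw [hvals]
    exact List.mem_map.mpr ⟨v0, hv0k, by rw [hcnt v0, hcv0]⟩
  have hdub : ∀ w ∈ (pvA nums).2.2.values, w ≤ (pvB nums).2.2.1 := by
    rw [hvals]
    intro w hw
    obtain ⟨k, hk, rfl⟩ := List.mem_map.1 hw
    rw [hcnt k]
    exact hmax k ((PySem.Set.mem_ofList _ _).mp (hkeys ▸ hk))
  have hmaxsome : PySem.List.max? (pvA nums).2.2.values (fun y => y) = some ((pvB nums).2.2.1) := by
    cases hmx : PySem.List.max? (pvA nums).2.2.values (fun y => y) with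
    | none =>
        rw [PySem.List.max?_eq_none_iff] at hmx
        rw [hmx] at hdmem
        simp at hdmem
    | some m =>
        have h1 : m ∈ (pvA nums).2.2.values := PySem.List.max?_mem hmx
        have h2 := PySem.List.max?_isMax hmx _ hdmem
        have h3 := hdub m h1
        rw [le_antisymm h3 h2]
  show (pvA nums).2.2.keys.foldl _ _ = _
  rw [hmaxsome]
  simp only [Option.getD_some]
  refine pvFoldMin (fun k => (pvA nums).2.2.getD k 0 = (pvB nums).2.2.1)
    (fun k => (pvA nums).2.1.getD k 0 - (pvA nums).1.getD k 0 + 1) _ _ _ ?_ ?_ ?_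
  · obtain ⟨b1, b2, b3⟩ := hkeep v0 hv0
    omega
  · exact ⟨v0, hv0k, by show (pvA nums).2.2.getD v0 0 = (pvB nums).2.2.1; rw [hcnt v0]; exact hcv0,
      hansv0.symm⟩
  · intro k hk hck
    have hkm : k ∈ nums := (PySem.Set.mem_ofList _ _).mp (hkeys ▸ hk)
    exact hub k hkm (by rw [← hcnt k]; exact hck)

-- ===== VERDICT (by name: the statement is the Claim_ definition above) =====
theorem findShortestSubArray_spec : Claim_equal_findShortestSubArray := by
  intro nums _ hpre
  unfold Spec_findShortestSubArray
  rw [pvA_eq, pvB_eq]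
  exact pvMain nums hpre
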